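-- pv_equiv track=rewrite | github.com/lcwlouis/Colearni | adapters/parsers/chunker.py | _find_best_break
-- ===== SOURCE A (Python) =====
-- def _find_best_break(text: str, start: int, hard_end: int, min_offset: int) -> int:
--     """Find the best split point in *text[start:hard_end]*.
--
--     Priority: paragraph break (``\\n\\n``) > line break (``\\n``) > sentence
--     end (``. `` / ``? `` / ``! ``) > space.  Returns the absolute index
--     after the break character, or *hard_end* if no usable break is found.
--     """
--     region = text[start:hard_end]
--     for sep in ("\n\n", "\n"):
--         pos = region.rfind(sep)
--         if pos >= min_offset:
--             return start + pos + len(sep)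
--     # Sentence-end heuristic: ". " or "? " or "! "
--     for ending in (". ", "? ", "! "):
--         pos = region.rfind(ending)
--         if pos >= min_offset:
--             return start + pos + len(ending)
--     # Fallback: space
--     pos = region.rfind(" ")
--     if pos >= min_offset:
--         return start + pos + 1
--     return hard_end
-- ===== SOURCE B (Python) =====
-- def _find_best_break(text: str, start: int, hard_end: int, min_offset: int) -> int:
--     # Single forward pass recording the last start index of each separator,
--     # then one priority cascade (instead of six backwards rfind scans).
--     region = text[start:hard_end]
--     last_para = last_nl = last_dot = last_q = last_ex = last_sp = -1
--     for i in range(len(region)):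
--         two = region[i:i+2]
--         if two == "\n\n":
--             last_para = i
--         elif two == ". ":
--             last_dot = i
--         elif two == "? ":
--             last_q = i
--         elif two == "! ":
--             last_ex = i
--         c = region[i]
--         if c == "\n":
--             last_nl = i
--         elif c == " ":
--             last_sp = i
--     if last_para >= min_offset:
--         return start + last_para + 2
--     if last_nl >= min_offset:
--         return start + last_nl + 1
--     if last_dot >= min_offset:
--         return start + last_dot + 2
--     if last_q >= min_offset:
--         return start + last_q + 2
--     if last_ex >= min_offset:
--         return start + last_ex + 2
--     if last_sp >= min_offset:
--         return start + last_sp + 1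
--     return hard_end
-- ===== Notes on version B (the rewrite author's own statement) =====
-- stated objective: alternative
-- what changed: Replaces six separate backwards rfind scans of the region by a single forward pass that records the last start index of each separator pattern, followed by the same priority cascade.
import Mathlib
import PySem

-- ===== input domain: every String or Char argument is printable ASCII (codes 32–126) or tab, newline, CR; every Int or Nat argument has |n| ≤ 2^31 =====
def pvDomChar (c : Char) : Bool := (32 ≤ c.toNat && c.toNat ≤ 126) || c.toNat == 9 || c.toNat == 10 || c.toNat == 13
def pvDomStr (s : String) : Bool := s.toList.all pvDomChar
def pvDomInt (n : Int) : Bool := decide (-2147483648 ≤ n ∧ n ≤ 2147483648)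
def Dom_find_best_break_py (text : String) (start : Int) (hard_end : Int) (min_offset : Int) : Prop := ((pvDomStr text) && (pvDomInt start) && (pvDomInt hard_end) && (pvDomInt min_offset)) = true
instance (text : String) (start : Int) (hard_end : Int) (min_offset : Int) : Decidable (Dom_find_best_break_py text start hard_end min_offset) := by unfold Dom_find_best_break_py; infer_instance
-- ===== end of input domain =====

-- B replaces A's six backwards rfind scans by a single forward pass recording the
-- last start index of each separator pattern, then the same priority cascade (alternative, same cost).

-- ===== PORT A =====
def find_best_break_py (text : String) (start : Int) (hard_end : Int) (min_offset : Int) : Int :=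
  let region := PySem.Str.slice text (some start) (some hard_end)
  let pos := PySem.Str.rfind region "\n\n"
  if min_offset ≤ pos then start + pos + 2 else
  let pos := PySem.Str.rfind region "\n"
  if min_offset ≤ pos then start + pos + 1 else
  let pos := PySem.Str.rfind region ". "
  if min_offset ≤ pos then start + pos + 2 else
  let pos := PySem.Str.rfind region "? "
  if min_offset ≤ pos then start + pos + 2 else
  let pos := PySem.Str.rfind region "! "
  if min_offset ≤ pos then start + pos + 2 else
  let pos := PySem.Str.rfind region " "
  if min_offset ≤ pos then start + pos + 1 else
  hard_end

-- ===== PORT B =====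
-- one step of B's forward scan: state = (last_para, last_nl, last_dot, last_q, last_ex, last_sp)
def pvStep (rs : List Char) (st : Int × Int × Int × Int × Int × Int) (i : Nat) :
    Int × Int × Int × Int × Int × Int :=
  let (lp, ln, ld, lq, le, ls) := st
  let two := (rs.drop i).take 2          -- region[i:i+2]
  let (lp, ld, lq, le) :=
    if two = ['\n', '\n'] then ((i : Int), ld, lq, le)
    else if two = ['.', ' '] then (lp, (i : Int), lq, le)
    else if two = ['?', ' '] then (lp, ld, (i : Int), le)
    else if two = ['!', ' '] then (lp, ld, lq, (i : Int))
    else (lp, ld, lq, le)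
  let c := rs[i]?                         -- region[i]
  let (ln, ls) :=
    if c = some '\n' then ((i : Int), ls)
    else if c = some ' ' then (ln, (i : Int))
    else (ln, ls)
  (lp, ln, ld, lq, le, ls)

def find_best_break_py_alt (text : String) (start : Int) (hard_end : Int) (min_offset : Int) : Int :=
  let rs := (PySem.Str.slice text (some start) (some hard_end)).toList
  let st := (List.range rs.length).foldl (pvStep rs) (-1, -1, -1, -1, -1, -1)
  let (lp, ln, ld, lq, le, ls) := st
  if min_offset ≤ lp then start + lp + 2 else
  if min_offset ≤ ln then start + ln + 1 else
  if min_offset ≤ ld then start + ld + 2 else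
  if min_offset ≤ lq then start + lq + 2 else
  if min_offset ≤ le then start + le + 2 else
  if min_offset ≤ ls then start + ls + 1 else
  hard_end

-- ===== PRECONDITION & SPEC =====
def Spec_find_best_break_py (text : String) (start : Int) (hard_end : Int) (min_offset : Int) (out : Int) : Prop := out = find_best_break_py_alt text start hard_end min_offset
instance (text : String) (start : Int) (hard_end : Int) (min_offset : Int) (out : Int) : Decidable (Spec_find_best_break_py text start hard_end min_offset out) := by unfold Spec_find_best_break_py; infer_instance

-- ===== CLAIM (what is proved, stated in full; the proofs are below) =====
def Claim_equal_find_best_break_py : Prop := ∀ (text : String) (start : Int) (hard_end : Int) (min_offset : Int), Dom_find_best_break_py text start hard_end min_offset → Spec_find_best_break_py text start hard_end min_offset (find_best_break_py text start hard_end min_offset)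

-- ===== LEMMAS AND PROOFS =====

-- last index i < n at which sub starts in rs, else -1 (proof-side characterisation)
def pvLastIdx (rs sub : List Char) (n : Nat) : Int :=
  (List.range n).foldl (fun acc i => if sub <+: rs.drop i then (i : Int) else acc) (-1)

theorem pvLastIdx_succ (rs sub : List Char) (n : Nat) :
    pvLastIdx rs sub (n + 1) =
      if sub <+: rs.drop n then (n : Int) else pvLastIdx rs sub n := by
  simp [pvLastIdx, List.range_succ]

theorem pvGo_eq (rs sub : List Char) : ∀ n,
    PySem.Chars.rfind.go rs sub n = pvLastIdx rs sub (n + 1) := by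
  intro n
  induction n with
  | zero =>
      simp [PySem.Chars.rfind.go, pvLastIdx, List.range_succ, List.isPrefixOf_iff_prefix]
  | succ m ih =>
      rw [pvLastIdx_succ]
      simp [PySem.Chars.rfind.go, List.isPrefixOf_iff_prefix, ih]

theorem pvRfind_eq (rs sub : List Char) (h : sub ≠ []) :
    PySem.Chars.rfind rs sub = pvLastIdx rs sub rs.length := by
  show PySem.Chars.rfind.go rs sub rs.length = _
  rw [pvGo_eq, pvLastIdx_succ]
  have hnp : ¬ sub <+: rs.drop rs.length := by
    simp [List.drop_length, List.prefix_nil, h]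
  rw [if_neg hnp]

theorem pvTwoPrefix (a b : Char) (t : List Char) :
    (a :: b :: []) <+: t ↔ t.take 2 = [a, b] := by
  cases t with
  | nil => simp
  | cons x xs =>
      cases xs with
      | nil => simp [List.cons_prefix_cons]
      | cons y ys =>
          simp only [List.cons_prefix_cons, List.nil_prefix, and_true, List.take_succ_cons,
            List.take_zero, List.cons.injEq, and_true]
          constructor <;> rintro ⟨rfl, rfl⟩ <;> exact ⟨rfl, rfl⟩

theorem pvOnePrefix (c : Char) (rs : List Char) (i : Nat) :
    (c :: []) <+: rs.drop i ↔ rs[i]? = some c := by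
  rw [show rs[i]? = (rs.drop i)[0]? by simp [List.getElem?_drop]]
  cases h : rs.drop i with
  | nil => simp
  | cons x xs => simp [List.cons_prefix_cons, eq_comm]

theorem pvScan_eq (rs : List Char) : ∀ n,
    (List.range n).foldl (pvStep rs) (-1, -1, -1, -1, -1, -1) =
      (pvLastIdx rs ['\n', '\n'] n, pvLastIdx rs ['\n'] n, pvLastIdx rs ['.', ' '] n,
        pvLastIdx rs ['?', ' '] n, pvLastIdx rs ['!', ' '] n, pvLastIdx rs [' '] n) := by
  intro n
  induction n with
  | zero => simp [pvLastIdx]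
  | succ m ih =>
      rw [List.range_succ, List.foldl_append, ih]
      simp only [List.foldl_cons, List.foldl_nil, pvStep, pvLastIdx_succ,
        pvTwoPrefix, pvOnePrefix]
      split_ifs <;> simp_all

theorem pvRfindS_para (s : String) :
    PySem.Str.rfind s "\n\n" = pvLastIdx s.toList ['\n', '\n'] s.toList.length := by
  rw [PySem.Str.rfind_eq]; exact pvRfind_eq _ _ (by decide)
theorem pvRfindS_nl (s : String) :
    PySem.Str.rfind s "\n" = pvLastIdx s.toList ['\n'] s.toList.length := by
  rw [PySem.Str.rfind_eq]; exact pvRfind_eq _ _ (by decide)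
theorem pvRfindS_dot (s : String) :
    PySem.Str.rfind s ". " = pvLastIdx s.toList ['.', ' '] s.toList.length := by
  rw [PySem.Str.rfind_eq]; exact pvRfind_eq _ _ (by decide)
theorem pvRfindS_q (s : String) :
    PySem.Str.rfind s "? " = pvLastIdx s.toList ['?', ' '] s.toList.length := by
  rw [PySem.Str.rfind_eq]; exact pvRfind_eq _ _ (by decide)
theorem pvRfindS_ex (s : String) :
    PySem.Str.rfind s "! " = pvLastIdx s.toList ['!', ' '] s.toList.length := by
  rw [PySem.Str.rfind_eq]; exact pvRfind_eq _ _ (by decide)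
theorem pvRfindS_sp (s : String) :
    PySem.Str.rfind s " " = pvLastIdx s.toList [' '] s.toList.length := by
  rw [PySem.Str.rfind_eq]; exact pvRfind_eq _ _ (by decide)

-- ===== VERDICT (by name: the statement is the Claim_ definition above) =====
theorem find_best_break_py_spec : Claim_equal_find_best_break_py := by
  intro text start hard_end min_offset _
  unfold Spec_find_best_break_py find_best_break_py find_best_break_py_alt
  simp only [pvScan_eq, pvRfindS_para, pvRfindS_nl, pvRfindS_dot, pvRfindS_q, pvRfindS_ex,
    pvRfindS_sp]
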